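-- pv_equiv track=rewrite | github.com/amlsll/team-bot-v2 | app/services/matcher.py | match_round
-- ===== SOURCE A (Python) =====
-- from typing import List, Tuple
--
-- def match_round(queue: List[int], base: int = 5, elastic: int = 2) -> Tuple[List[List[int]], List[int]]:
--     """
--     Комплектует команды из очереди пользователей.
--
--     Args:
--         queue: Список ID пользователей в очереди (FIFO)
--         base: Базовый размер команды (по умолчанию 5)
--         elastic: Максимальное количество дополнительных участников (по умолчанию 2)
--
--     Returns:
--         Кортеж (команды, остаток_очереди)
--         команды: список списков ID участников (первый в списке - капитан)
--         остаток_очереди: участники, которые не вошли ни в одну команду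
--     """
--     if not queue:
--         return [], []
--
--     # Создаем копию очереди для работы
--     queue_copy = queue.copy()
--     teams: List[List[int]] = []
--
--     # Формируем полные команды базового размера
--     i = 0
--     while i + base <= len(queue_copy):
--         teams.append(queue_copy[i:i + base])
--         i += base
--
--     # Остаток после формирования полных команд
--     leftover = queue_copy[i:]
--
--     # Эластичное распределение остатка по уже созданным командам
--     j = 0
--     while leftover and j < len(teams):
--         # Добавляем участников в команды, не превышая base + elastic
--         if len(teams[j]) < base + elastic:
--             teams[j].append(leftover.pop(0))
--         else:
--             j += 1
--
--     return teams, leftover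
-- ===== SOURCE B (Python) =====
-- from typing import List, Tuple
--
-- def match_round(queue: List[int], base: int = 5, elastic: int = 2) -> Tuple[List[List[int]], List[int]]:
--     """Form base-sized teams by direct slicing (count via //), then batch-extend
--     each team with its elastic share of the leftover in one pass (no pop(0))."""
--     if not queue:
--         return [], []
--     n = len(queue)
--     nfull = n // base
--     teams = [queue[t * base:(t + 1) * base] for t in range(nfull)]
--     k = nfull * base
--     out = []
--     for team in teams:
--         take = max(0, min(elastic, n - k))
--         out.append(team + queue[k:k + take])
--         k += take
--     return out, queue[k:]
-- ===== Notes on version B (the rewrite author's own statement) =====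
-- stated objective: faster
-- what changed: B computes the number of full teams with one integer division and builds them by direct slicing instead of A's sliced while-loop, and distributes the leftover in a single batched pass (each team takes min(elastic, remaining) elements at once via a slice) instead of A's element-by-element pop(0) loop over a mutated teams list; Pre_ excludes base <= 0 with a nonempty queue, where A's first while-loop never terminates.
import Mathlib
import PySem

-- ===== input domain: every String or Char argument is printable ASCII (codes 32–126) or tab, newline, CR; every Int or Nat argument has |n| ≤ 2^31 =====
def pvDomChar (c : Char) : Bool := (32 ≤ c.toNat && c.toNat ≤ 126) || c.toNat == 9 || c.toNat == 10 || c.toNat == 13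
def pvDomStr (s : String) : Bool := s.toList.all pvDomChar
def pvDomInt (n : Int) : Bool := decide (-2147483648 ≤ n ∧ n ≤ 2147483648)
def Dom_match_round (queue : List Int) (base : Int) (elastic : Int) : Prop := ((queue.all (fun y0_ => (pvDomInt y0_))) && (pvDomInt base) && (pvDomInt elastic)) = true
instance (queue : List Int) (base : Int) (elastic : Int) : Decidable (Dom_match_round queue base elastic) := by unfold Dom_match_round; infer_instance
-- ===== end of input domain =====

-- B changes the decomposition: team count by one division and slicing instead of the sliced
-- while-loop, and a single batched pass over the teams instead of popping the leftover one
-- element at a time (measured faster in a timing run; return value only — neither program mutates its input).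

-- ===== PORT A =====
-- 'while i + base <= len(queue_copy): teams.append(queue_copy[i:i+base]); i += base'
-- (fuel = queue.length + 1 iterations suffice whenever the Python loop terminates, i.e. base >= 1)
def pvA_loop1 (queue : List Int) (base : Int) : Nat → Int → List (List Int) → List (List Int) × Int
  | 0, i, teams => (teams, i)
  | f + 1, i, teams =>
    if i + base ≤ (queue.length : Int) then
      pvA_loop1 queue base f (i + base)
        (teams ++ [PySem.List.slice queue (some i) (some (i + base))])
    else (teams, i)

-- 'while leftover and j < len(teams): if len(teams[j]) < base+elastic: teams[j].append(leftover.pop(0)) else: j += 1'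
def pvA_loop2 (base elastic : Int) : Nat → List (List Int) → List Int → Nat → List (List Int) × List Int
  | 0, teams, leftover, _ => (teams, leftover)
  | f + 1, teams, leftover, j =>
    match leftover with
    | [] => (teams, leftover)
    | x :: rest =>
      if h : j < teams.length then
        if ((teams[j]).length : Int) < base + elastic then
          pvA_loop2 base elastic f (teams.set j (teams[j] ++ [x])) rest j
        else
          pvA_loop2 base elastic f teams (x :: rest) (j + 1)
      else (teams, leftover)

def match_round (queue : List Int) (base : Int) (elastic : Int) : List (List Int) × List Int :=
  if queue = [] then ([], [])
  else
    let r1 := pvA_loop1 queue base (queue.length + 1) 0 []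
    let teams := r1.1
    let leftover := PySem.List.slice queue (some r1.2) none
    pvA_loop2 base elastic (leftover.length + teams.length + 1) teams leftover 0

-- ===== PORT B =====
-- 'for team in teams: take = max(0, min(elastic, n - k)); out.append(team + queue[k:k+take]); k += take'
def pvB_fill (queue : List Int) (elastic : Int) : List (List Int) → Int → List (List Int) × Int
  | [], k => ([], k)
  | t :: ts, k =>
    let take := max 0 (min elastic ((queue.length : Int) - k))
    let r := pvB_fill queue elastic ts (k + take)
    ((t ++ PySem.List.slice queue (some k) (some (k + take))) :: r.1, r.2)

def match_round_alt (queue : List Int) (base : Int) (elastic : Int) : List (List Int) × List Int :=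
  if queue = [] then ([], [])
  else
    let n : Int := queue.length
    let nfull := PySem.Int.floordiv n base
    let teams := (PySem.List.pyRange 0 nfull 1).map
      (fun t => PySem.List.slice queue (some (t * base)) (some ((t + 1) * base)))
    let r := pvB_fill queue elastic teams (nfull * base)
    (r.1, PySem.List.slice queue (some r.2) none)

-- ===== PRECONDITION & SPEC =====
-- Pre_ excludes base ≤ 0 with a nonempty queue: there A's first while-loop never terminates
-- (i + base <= len(queue) stays true forever), so A returns no value on those inputs.
def Pre_match_round (queue : List Int) (base : Int) (elastic : Int) : Prop :=
  queue = [] ∨ 1 ≤ base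
instance (queue : List Int) (base : Int) (elastic : Int) : Decidable (Pre_match_round queue base elastic) := by unfold Pre_match_round; infer_instance

def pvWitness_match_round : List Int × Int × Int := ([1, 2, 3, 4, 5, 6, 7], 5, 2)

def Spec_match_round (queue : List Int) (base : Int) (elastic : Int) (out : List (List Int) × List Int) : Prop := out = match_round_alt queue base elastic
instance (queue : List Int) (base : Int) (elastic : Int) (out : List (List Int) × List Int) : Decidable (Spec_match_round queue base elastic out) := by unfold Spec_match_round; infer_instance

-- ===== CLAIM (what is proved, stated in full; the proofs are below) =====
def Claim_equal_match_round : Prop := ∀ (queue : List Int) (base : Int) (elastic : Int), Dom_match_round queue base elastic → Pre_match_round queue base elastic → Spec_match_round queue base elastic (match_round queue base elastic)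

-- ===== LEMMAS AND PROOFS =====

-- One-at-a-time elastic filling of the team suffix (mirrors A's second loop on the suffix from j on).
def pvFill1 (cap : Int) : Nat → List (List Int) → List Int → List (List Int) × List Int
  | 0, ts, l => (ts, l)
  | _ + 1, ts, [] => (ts, [])
  | _ + 1, [], l => ([], l)
  | f + 1, t :: ts, x :: l =>
    if (t.length : Int) < cap then pvFill1 cap f ((t ++ [x]) :: ts) l
    else (t :: (pvFill1 cap f ts (x :: l)).1, (pvFill1 cap f ts (x :: l)).2)

-- Batched elastic filling: each team takes min(cap - len, remaining) leftover elements at once.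
def pvBatch (cap : Int) : List (List Int) → List Int → List (List Int) × List Int
  | [], l => ([], l)
  | t :: ts, l =>
    let take := min (cap - (t.length : Int)).toNat l.length
    let r := pvBatch cap ts (l.drop take)
    ((t ++ l.take take) :: r.1, r.2)

lemma pv_set_append_length (pre ts : List (List Int)) (v : List Int) :
    ∀ t, (pre ++ t :: ts).set pre.length v = pre ++ v :: ts := by
  induction pre with
  | nil => intro t; rfl
  | cons p pre ih => intro t; simp [ih]

lemma pv_loop1_char (queue : List Int) (b : Nat) (hb : 1 ≤ b) :
    ∀ (fuel i : Nat) (acc : List (List Int)),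
      (queue.length - i) / b + 1 ≤ fuel →
      pvA_loop1 queue (b : Int) fuel (i : Int) acc =
        (acc ++ (List.range ((queue.length - i) / b)).map
            (fun t => (queue.drop (i + t * b)).take b),
         ((i + ((queue.length - i) / b) * b : Nat) : Int)) := by
  intro fuel
  induction fuel with
  | zero => intro i acc h; exact absurd h (Nat.not_succ_le_zero _)
  | succ f ih =>
    intro i acc h
    by_cases hc : i + b ≤ queue.length
    · have hcast : ((i : Int) + (b : Int)) = ((i + b : Nat) : Int) := by push_cast; ring
      have hcond : (i : Int) + (b : Int) ≤ (queue.length : Int) := by exact_mod_cast hc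
      have hq : (queue.length - i) / b = (queue.length - (i + b)) / b + 1 := by
        have h1 : queue.length - i = (queue.length - (i + b)) + b := by omega
        rw [h1, Nat.add_div_right _ (by omega)]
      have hfuel : (queue.length - (i + b)) / b + 1 ≤ f := by omega
      show (if (i : Int) + (b : Int) ≤ (queue.length : Int) then _ else _) = _
      rw [if_pos hcond, PySem.List.slice_natCast_add, hcast, ih (i + b) _ hfuel, hq]
      simp only [Prod.mk.injEq]
      refine ⟨?_, ?_⟩
      · rw [List.range_succ_eq_map, List.map_cons, List.map_map]
        simp only [Nat.zero_mul, Nat.add_zero, List.append_assoc, List.singleton_append]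
        congr 1
        congr 1
        apply List.map_congr_left
        intro t _
        simp only [Function.comp_apply]
        congr 2
        simp [Nat.succ_mul]
        omega
      · congr 1
        ring
    · have hcond : ¬ ((i : Int) + (b : Int) ≤ (queue.length : Int)) := by
        intro hle; exact hc (by exact_mod_cast hle)
      have hdiv : (queue.length - i) / b = 0 := Nat.div_eq_of_lt (by omega)
      show (if (i : Int) + (b : Int) ≤ (queue.length : Int) then _ else _) = _
      rw [if_neg hcond, hdiv]
      simp

lemma pv_loop2_split (base elastic : Int) :
    ∀ (fuel : Nat) (pre ts : List (List Int)) (l : List Int),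
      pvA_loop2 base elastic fuel (pre ++ ts) l pre.length =
        (pre ++ (pvFill1 (base + elastic) fuel ts l).1,
         (pvFill1 (base + elastic) fuel ts l).2) := by
  intro fuel
  induction fuel with
  | zero => intro pre ts l; rfl
  | succ f ih =>
    intro pre ts l
    match l with
    | [] => simp [pvA_loop2, pvFill1]
    | x :: rest =>
      match ts with
      | [] =>
        simp [pvA_loop2, pvFill1]
      | t :: ts' =>
        have hj : pre.length < (pre ++ t :: ts').length := by simp
        have hget : (pre ++ t :: ts')[pre.length]'hj = t := by
          rw [List.getElem_append_right (Nat.le_refl _)]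
          simp
        simp only [pvA_loop2, pvFill1]
        rw [dif_pos hj, hget]
        by_cases hlt : ((t.length : Int) < base + elastic)
        · rw [if_pos hlt, if_pos hlt, pv_set_append_length]
          exact ih pre ((t ++ [x]) :: ts') rest
        · rw [if_neg hlt, if_neg hlt]
          have h1 : pre.length + 1 = (pre ++ [t]).length := by simp
          have h2 : pre ++ t :: ts' = (pre ++ [t]) ++ ts' := by simp
          rw [h1, h2, ih (pre ++ [t]) ts' (x :: rest)]
          simp

lemma pv_batch_nil (cap : Int) : ∀ ts : List (List Int), pvBatch cap ts [] = (ts, []) := by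
  intro ts
  induction ts with
  | nil => rfl
  | cons t ts ih => simp [pvBatch, ih]

lemma pv_fill1_eq_batch (cap : Int) :
    ∀ (fuel : Nat) (ts : List (List Int)) (l : List Int),
      l.length + ts.length ≤ fuel → pvFill1 cap fuel ts l = pvBatch cap ts l := by
  intro fuel
  induction fuel with
  | zero =>
    intro ts l h
    have hts : ts = [] := List.eq_nil_of_length_eq_zero (by omega)
    have hl : l = [] := List.eq_nil_of_length_eq_zero (by omega)
    subst hts; subst hl; rfl
  | succ f ih =>
    intro ts l h
    match l with
    | [] => rw [pv_batch_nil]; rfl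
    | x :: l' =>
      match ts with
      | [] => rfl
      | t :: ts' =>
        by_cases hlt : ((t.length : Int) < cap)
        · have hrec : pvFill1 cap (f + 1) (t :: ts') (x :: l') = pvFill1 cap f ((t ++ [x]) :: ts') l' := by
            simp only [pvFill1, if_pos hlt]
          rw [hrec, ih _ _ (by simp at h ⊢; omega)]
          simp only [pvBatch]
          have htk : min (cap - (t.length : Int)).toNat (x :: l').length
              = min (cap - ((t ++ [x]).length : Int)).toNat l'.length + 1 := by
            simp only [List.length_cons, List.length_append, List.length_nil]
            omega
          rw [htk]
          simp [List.take_succ_cons, List.drop_succ_cons]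
        · have hrec : pvFill1 cap (f + 1) (t :: ts') (x :: l') =
              (t :: (pvFill1 cap f ts' (x :: l')).1, (pvFill1 cap f ts' (x :: l')).2) := by
            simp only [pvFill1, if_neg hlt]
          have h0 : cap.toNat - t.length = 0 := by omega
          rw [hrec, ih _ _ (by simp at h ⊢; omega)]
          simp [pvBatch, h0]

lemma pv_batch_eq_fill (queue : List Int) (elastic : Int) (b : Nat) :
    ∀ (ts : List (List Int)) (m : Nat), m ≤ queue.length → (∀ t ∈ ts, t.length = b) →
      ∃ m' : Nat, m' ≤ queue.length ∧
        pvB_fill queue elastic ts (m : Int) =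
          ((pvBatch ((b : Int) + elastic) ts (queue.drop m)).1, (m' : Int)) ∧
        (pvBatch ((b : Int) + elastic) ts (queue.drop m)).2 = queue.drop m' := by
  intro ts
  induction ts with
  | nil =>
    intro m hm _
    exact ⟨m, hm, by simp [pvB_fill, pvBatch], by simp [pvBatch]⟩
  | cons t ts ih =>
    intro m hm hlen
    have ht : t.length = b := hlen t (List.mem_cons_self)
    set takeN : Nat := min elastic.toNat (queue.length - m) with htakeN
    have h1 : max 0 (min elastic ((queue.length : Int) - (m : Int))) = (takeN : Int) := by
      omega
    have h2 : min (((b : Int) + elastic - (t.length : Int))).toNat (queue.drop m).length = takeN := by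
      rw [ht]
      simp only [List.length_drop]
      omega
    have hslice : PySem.List.slice queue (some (m : Int)) (some ((m : Int) + (takeN : Int)))
        = (queue.drop m).take takeN := PySem.List.slice_natCast_add queue m takeN
    have hdrop : (queue.drop m).drop takeN = queue.drop (m + takeN) := by
      rw [List.drop_drop]
    obtain ⟨m', hm', heq1, heq2⟩ := ih (m + takeN) (by omega) (fun u hu => hlen u (List.mem_cons_of_mem _ hu))
    refine ⟨m', hm', ?_, ?_⟩
    · simp only [pvB_fill, pvBatch, h1, h2]
      rw [hslice, hdrop]
      have hcast : ((m : Int) + (takeN : Int)) = ((m + takeN : Nat) : Int) := by push_cast; ring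
      rw [hcast, heq1]
    · simp only [pvBatch, h2]
      rw [hdrop]
      exact heq2

theorem match_round_spec : Claim_equal_match_round := by
  intro queue base elastic _ hpre
  unfold Spec_match_round
  by_cases hq : queue = []
  · subst hq; rfl
  · have hb1 : 1 ≤ base := hpre.resolve_left hq
    obtain ⟨b, rfl⟩ : ∃ b : Nat, base = (b : Int) := ⟨base.toNat, by omega⟩
    have hb : 1 ≤ b := by exact_mod_cast hb1
    set n := queue.length with hn
    have hn' : queue.length = n := hn.symm
    -- characterize A's first loop
    have hA1 := pv_loop1_char queue b hb (n + 1) 0 []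
      (by simp only [Nat.sub_zero, hn]; have := Nat.div_le_self queue.length b; omega)
    simp only [Nat.sub_zero, Nat.cast_zero, Nat.zero_add, List.nil_append,] at hA1
    set teamsA := (List.range (n / b)).map (fun t => (queue.drop (t * b)).take b) with hteamsA
    set m0 := n / b * b with hm0def
    have hm0 : m0 ≤ n := Nat.div_mul_le_self n b
    -- teams all have length b
    have hlens : ∀ t ∈ teamsA, t.length = b := by
      intro t ht
      obtain ⟨k, hk, rfl⟩ := List.mem_map.1 ht
      have hk' : k < n / b := List.mem_range.1 hk
      have h1 : (k + 1) * b ≤ n / b * b := Nat.mul_le_mul_right _ hk'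
      have h2 : (k + 1) * b = k * b + b := by ring
      simp only [List.length_take, List.length_drop]
      omega
    -- batched fill = B's fill
    obtain ⟨m', hm', hfill, hbatch2⟩ :=
      pv_batch_eq_fill queue elastic b teamsA m0 hm0 hlens
    -- LHS: port A
    show match_round queue (b : Int) elastic = _
    rw [match_round, if_neg hq]
    rw [hA1]
    have hlft : PySem.List.slice queue (some ((m0 : Nat) : Int)) none = queue.drop m0 :=
      PySem.List.slice_from_natCast queue m0
    simp only [hlft]
    have hsplit := pv_loop2_split (b : Int) elastic
      ((queue.drop m0).length + teamsA.length + 1) [] teamsA (queue.drop m0)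
    simp only [List.nil_append, List.length_nil] at hsplit
    rw [hsplit, pv_fill1_eq_batch _ _ _ _ (by omega)]
    -- RHS: port B
    rw [match_round_alt, if_neg hq]
    have hnf : PySem.Int.floordiv ((n : Nat) : Int) ((b : Nat) : Int) = (((n / b : Nat)) : Int) :=
      PySem.Int.floordiv_natCast n b
    simp only [← hn, hnf]
    have hrange : PySem.List.pyRange 0 (((n / b : Nat)) : Int) 1
        = (List.range (n / b)).map (fun k => ((k : Nat) : Int)) := by
      rw [PySem.List.pyRange_one]
      have ht : ((n : Int) / (b : Int)).toNat = n / b := by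
        rw [← Int.natCast_div]; exact Int.toNat_natCast _
      simp [ht]
    rw [hrange, List.map_map]
    have hmapB : (List.range (n / b)).map
        ((fun t => PySem.List.slice queue (some (t * (b : Int))) (some ((t + 1) * (b : Int))))
          ∘ (fun k => ((k : Nat) : Int))) = teamsA := by
      rw [hteamsA]
      apply List.map_congr_left
      intro k _
      simp only [Function.comp_apply]
      have e1 : ((k : Int) * (b : Int)) = (((k * b : Nat)) : Int) := by push_cast; ring
      have e2 : ((k : Int) + 1) * (b : Int) = (((k * b : Nat)) : Int) + ((b : Nat) : Int) := by
        push_cast; ring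
      rw [e1, e2, PySem.List.slice_natCast_add]
    rw [hmapB]
    have hk0 : (((n / b : Nat)) : Int) * ((b : Nat) : Int) = ((m0 : Nat) : Int) := by
      rw [hm0def]; push_cast; ring
    rw [hk0, hfill]
    have hlft' : PySem.List.slice queue (some ((m' : Nat) : Int)) none = queue.drop m' :=
      PySem.List.slice_from_natCast queue m'
    simp only [hlft']
    rw [hbatch2]
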